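-- pv_equiv track=rewrite | github.com/Theorize/goneHacking | main_app/views.py | parse_text
-- ===== SOURCE A (Python) =====
-- def parse_text(text_string):
--     """Function docs string"""
--     user_dict = {}
--     punctuation = ['.', ',', '!', '?', ':', ';']
--     for punct in punctuation:
--         text_string = text_string.replace(punct, ' ')
--     string_list = text_string.split(' ')
--     bigram_list = get_n_grams(string_list, 2)
--     merged_list = string_list + bigram_list
--     for s in merged_list:
--         user_dict[s.lower()] = ''
--
--     return user_dict
--
-- def get_n_grams(words, n):
--     """Build an ngram"""
--     n_grams = []
--     for i in range(0, len(words)-n+1):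
--         n_grams.append(' '.join(words[i:(i+n)]))
--     return n_grams
-- ===== SOURCE B (Python) =====
-- def parse_text(text_string):
--     """Character-level scanner: a single pass over the characters builds the
--     lowercased word stream and the bigram stream directly (no replace/split/
--     slice-join passes); the dict is then filled words-first, bigrams-second."""
--     words, bigrams = [], []
--     token = []
--
--     def flush(tok):
--         word = ''.join(tok)
--         if words:
--             bigrams.append(words[-1] + ' ' + word)
--         words.append(word)
--
--     for ch in text_string:
--         if ch in ' .,!?:;':
--             flush(token)
--             token = []
--         else:
--             token.append(ch.lower())
--     flush(token)
--
--     user_dict = {}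
--     for key in words + bigrams:
--         user_dict[key] = ''
--     return user_dict
-- ===== Notes on version B (the rewrite author's own statement) =====
-- stated objective: alternative
-- what changed: Replaces the staged pipeline (six str.replace passes, split, the get_n_grams index/slice/join helper, list concatenation, a lowercasing insert loop) by a single character-level scanner that tokenizes the raw text in one pass, lowercasing characters as it goes and emitting each bigram from the previous completed word, then fills the dict words-first, bigrams-second.
import Mathlib
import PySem

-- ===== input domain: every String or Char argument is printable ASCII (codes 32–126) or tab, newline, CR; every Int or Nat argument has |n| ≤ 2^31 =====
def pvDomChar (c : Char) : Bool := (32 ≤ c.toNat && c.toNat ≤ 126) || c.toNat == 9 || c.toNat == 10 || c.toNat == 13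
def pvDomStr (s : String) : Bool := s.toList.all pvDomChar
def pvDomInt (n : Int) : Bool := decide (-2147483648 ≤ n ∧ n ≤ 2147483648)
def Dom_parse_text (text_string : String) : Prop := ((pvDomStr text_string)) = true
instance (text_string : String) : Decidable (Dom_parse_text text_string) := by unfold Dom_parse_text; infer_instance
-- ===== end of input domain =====

-- B replaces A's staged pipeline (six replace passes, split, the get_n_grams slice/join helper,
-- list concatenation, a lowercasing insert loop) by one character-level scanning pass.

-- ===== PORT A =====
def get_n_grams (words : List String) (n : Int) : List String :=
  (PySem.List.pyRange 0 ((words.length : Int) - n + 1) 1).foldl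
    (fun n_grams i => n_grams ++ [PySem.Str.join " " (PySem.List.slice words (some i) (some (i + n)))]) []

def parse_text (text_string : String) : List (String × String) :=
  let punctuation : List String := [".", ",", "!", "?", ":", ";"]
  let t := punctuation.foldl (fun s punct => PySem.Str.replace s punct " ") text_string
  let string_list := (PySem.Str.split? t " ").getD []
  let bigram_list := get_n_grams string_list 2
  let merged_list := string_list ++ bigram_list
  (merged_list.foldl (fun d s => d.insert (PySem.Str.lower s) "") PySem.Dict.empty).items

-- ===== PORT B =====
-- the 'flush(tok)' helper of Source B: complete the current token, emitting a bigram with words[-1]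
def pvFlush (words bigrams : List String) (tok : List Char) : List String × List String :=
  let word := String.ofList tok
  let bigrams :=
    match words.getLast? with
    | some prev => bigrams ++ [String.ofList (prev.toList ++ ' ' :: word.toList)]
    | none => bigrams
  (words ++ [word], bigrams)

-- the body of Source B's for-loop over the characters
def pvStep (st : List String × List String × List Char) (c : Char) :
    List String × List String × List Char :=
  if c ∈ [' ', '.', ',', '!', '?', ':', ';'] then
    let p := pvFlush st.1 st.2.1 st.2.2
    (p.1, p.2, [])
  else (st.1, st.2.1, st.2.2 ++ [PySem.Chars.lowerChar c])

def parse_text_alt (text_string : String) : List (String × String) :=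
  let st := text_string.toList.foldl pvStep ([], [], [])
  let p := pvFlush st.1 st.2.1 st.2.2
  ((p.1 ++ p.2).foldl (fun d k => d.insert k "") (PySem.Dict.empty : PySem.Dict String String)).items

-- ===== PRECONDITION & SPEC =====
def Spec_parse_text (text_string : String) (out : List (String × String)) : Prop := out = parse_text_alt text_string
instance (text_string : String) (out : List (String × String)) : Decidable (Spec_parse_text text_string out) := by unfold Spec_parse_text; infer_instance

-- ===== CLAIM (what is proved, stated in full; the proofs are below) =====
def Claim_equal_parse_text : Prop := ∀ (text_string : String), Dom_parse_text text_string → Spec_parse_text text_string (parse_text text_string)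

-- ===== LEMMAS AND PROOFS =====

-- A's punctuation replacement, as a per-character map
def pvPunct : List Char := ['.', ',', '!', '?', ':', ';']
def pvClean (c : Char) : Char := if c ∈ pvPunct then ' ' else c

lemma replace_go_single (o n' : Char) :
    ∀ (fuel : Nat) (l acc : List Char), l.length ≤ fuel →
      PySem.Chars.replace.go [o] [n'] fuel l acc
        = acc.reverse ++ l.map (fun c => if c = o then n' else c) := by
  intro fuel
  induction fuel with
  | zero => intro l acc h; cases l with
    | nil => simp [PySem.Chars.replace.go]
    | cons c t => simp at h
  | succ fuel ih =>
    intro l acc h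
    cases l with
    | nil => simp [PySem.Chars.replace.go]
    | cons c t =>
      simp only [PySem.Chars.replace.go]
      by_cases hc : c = o
      · subst hc
        have hp : [c].isPrefixOf (c :: t) = true := by simp [List.isPrefixOf]
        simp only [hp, List.length_cons]
        simp only [if_true, List.length_nil, Nat.zero_add, List.drop_succ_cons, List.drop_zero, List.reverse_singleton, List.singleton_append]
        rw [ih t (n' :: acc) (by simp at h; omega)]
        simp
      · have hp : [o].isPrefixOf (c :: t) = false := by
          simp [List.isPrefixOf]; exact fun h => absurd h.symm hc
        simp only [hp, Bool.false_eq_true, if_false]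
        rw [ih t (c :: acc) (by simp at h; omega)]
        simp [hc]

lemma replace_single (cs : List Char) (o n' : Char) :
    PySem.Chars.replace cs [o] [n'] = cs.map (fun c => if c = o then n' else c) := by
  rw [PySem.Chars.replace]
  simp only [List.isEmpty_cons, Bool.false_eq_true, if_false]
  simpa using replace_go_single o n' cs.length cs [] le_rfl

lemma clean_eq (s : String) :
    (([".", ",", "!", "?", ":", ";"] : List String).foldl
        (fun s punct => PySem.Str.replace s punct " ") s).toList
      = s.toList.map pvClean := by
  simp only [List.foldl_cons, List.foldl_nil, PySem.Str.toList_replace]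
  rw [show (".").toList = ['.'] from rfl, show (",").toList = [','] from rfl,
      show ("!").toList = ['!'] from rfl, show ("?").toList = ['?'] from rfl,
      show (":").toList = [':'] from rfl, show (";").toList = [';'] from rfl,
      show (" ").toList = [' '] from rfl]
  simp only [replace_single, List.map_map]
  apply List.map_congr_left
  intro c _
  simp only [Function.comp, pvClean, pvPunct, List.mem_cons, List.not_mem_nil, or_false]
  by_cases h1 : c = '.' <;> by_cases h2 : c = ',' <;> by_cases h3 : c = '!' <;>
    by_cases h4 : c = '?' <;> by_cases h5 : c = ':' <;> by_cases h6 : c = ';' <;>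
    simp_all

-- splitting a character list on one delimiter character, structurally
def pvSplitC (d : Char) : List Char → List (List Char)
  | [] => [[]]
  | c :: t => if c = d then [] :: pvSplitC d t else (pvSplitC d t).modifyHead (c :: ·)

-- splitting on the whole delimiter set (space + punctuation) — what the scanner tokenizes by
def pvDelims : List Char := [' ', '.', ',', '!', '?', ':', ';']
def pvSplit : List Char → List (List Char)
  | [] => [[]]
  | c :: t => if c ∈ pvDelims then [] :: pvSplit t else (pvSplit t).modifyHead (c :: ·)

lemma pvSplit_ne_nil : ∀ l, pvSplit l ≠ [] := by
  intro l
  induction l with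
  | nil => simp [pvSplit]
  | cons c t ih =>
    simp only [pvSplit]
    split_ifs
    · simp
    · cases h : pvSplit t with
      | nil => exact absurd h ih
      | cons a r => simp [List.modifyHead]

lemma splitOn_go_single (d : Char) :
    ∀ (fuel : Nat) (l cur : List Char) (acc : List (List Char)), l.length ≤ fuel →
      PySem.Chars.splitOn.go [d] fuel l cur acc
        = acc.reverse ++ (pvSplitC d l).modifyHead (cur.reverse ++ ·) := by
  intro fuel
  induction fuel with
  | zero =>
    intro l cur acc h
    cases l with
    | nil => simp [PySem.Chars.splitOn.go, pvSplitC, List.modifyHead]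
    | cons c t => simp at h
  | succ fuel ih =>
    intro l cur acc h
    cases l with
    | nil => simp [PySem.Chars.splitOn.go, pvSplitC, List.modifyHead]
    | cons c t =>
      simp only [PySem.Chars.splitOn.go]
      by_cases hc : c = d
      · subst hc
        have hp : [c].isPrefixOf (c :: t) = true := by simp [List.isPrefixOf]
        simp only [hp, if_true, List.length_cons, List.drop_succ_cons, List.length_nil, List.drop_zero]
        rw [ih t [] (cur.reverse :: acc) (by simp at h; omega)]
        simp only [List.reverse_cons, List.reverse_nil, List.nil_append]
        rw [show (fun x : List Char => x) = id from rfl, List.modifyHead_id]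
        simp [pvSplitC]
      · have hp : [d].isPrefixOf (c :: t) = false := by
          simp [List.isPrefixOf]; exact fun h => absurd h.symm hc
        simp only [hp, Bool.false_eq_true, if_false]
        rw [ih t (c :: cur) acc (by simp at h; omega)]
        simp only [pvSplitC, if_neg hc, List.reverse_cons, List.modifyHead_modifyHead]
        congr 1
        apply congrFun
        apply congrArg
        funext x
        simp

lemma splitC_eq (d : Char) (cs : List Char) :
    PySem.Chars.splitOn cs [d] = pvSplitC d cs := by
  rw [PySem.Chars.splitOn, splitOn_go_single d (cs.length + 1) cs [] [] (by omega)]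
  rw [show (fun x => ([] : List Char).reverse ++ x) = id from by funext x; simp,
      List.modifyHead_id]
  simp

-- cleaning then splitting on ' ' = splitting the raw characters on the delimiter set
lemma splitC_clean (l : List Char) : pvSplitC ' ' (l.map pvClean) = pvSplit l := by
  induction l with
  | nil => rfl
  | cons c t ih =>
    simp only [List.map_cons, pvSplitC, pvSplit]
    by_cases hd : c ∈ pvDelims
    · have : pvClean c = ' ' := by
        simp only [pvDelims, List.mem_cons, List.not_mem_nil, or_false] at hd
        rcases hd with h|h|h|h|h|h|h <;> subst h <;> rfl
      rw [this, if_pos rfl, if_pos hd, ih]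
    · have h1 : pvClean c = c := by
        simp only [pvClean, pvPunct]
        rw [if_neg]
        intro hmem
        apply hd
        simp only [pvDelims, List.mem_cons] at *
        tauto
      have h2 : ¬ c = ' ' := by
        intro h; apply hd; simp [pvDelims, h]
      rw [h1, if_neg h2, if_neg hd, ih]

-- the bigram list of a word list
def pvBigs (l : List String) : List String :=
  (l.zip l.tail).map (fun p => String.ofList (p.1.toList ++ ' ' :: p.2.toList))

lemma pvBigs_cons_cons (a b : String) (r : List String) :
    pvBigs (a :: b :: r) = String.ofList (a.toList ++ ' ' :: b.toList) :: pvBigs (b :: r) := by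
  simp [pvBigs]

-- Source B's flush, iterated over a ready token list
def pvFlushAll (words bigrams : List String) : List (List Char) → List String × List String
  | [] => (words, bigrams)
  | t :: ts =>
    let p := pvFlush words bigrams t
    pvFlushAll p.1 p.2 ts

lemma flushAll_inv :
    ∀ (ts : List (List Char)) (ws : List String) (w : String) (bs : List String),
      pvFlushAll (ws ++ [w]) bs ts
        = (ws ++ [w] ++ ts.map String.ofList, bs ++ pvBigs (w :: ts.map String.ofList)) := by
  intro ts
  induction ts with
  | nil => intro ws w bs; simp [pvFlushAll, pvBigs]
  | cons t ts ih =>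
    intro ws w bs
    simp only [pvFlushAll, pvFlush, List.getLast?_concat, List.map_cons]
    rw [show ws ++ [w] ++ [String.ofList t] = (ws ++ [w]) ++ [String.ofList t] from by simp,
        ih (ws ++ [w]) (String.ofList t)
          (bs ++ [String.ofList (w.toList ++ ' ' :: (String.ofList t).toList)])]
    rw [pvBigs_cons_cons]
    simp

lemma flushAll_full (t : List Char) (ts : List (List Char)) :
    pvFlushAll [] [] (t :: ts)
      = ((t :: ts).map String.ofList, pvBigs ((t :: ts).map String.ofList)) := by
  simp only [pvFlushAll, pvFlush, List.getLast?_nil, List.nil_append, List.map_cons]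
  exact flushAll_inv ts [] (String.ofList t) []

lemma map_lower_modifyHead (c : Char) (xs : List (List Char)) :
    (xs.modifyHead (c :: ·)).map (List.map PySem.Chars.lowerChar)
      = (xs.map (List.map PySem.Chars.lowerChar)).modifyHead (PySem.Chars.lowerChar c :: ·) := by
  cases xs <;> simp

-- the scanner loop, related to splitting + lowercasing
lemma scan_eq :
    ∀ (l : List Char) (ws bs : List String) (tok : List Char),
      pvFlush (l.foldl pvStep (ws, bs, tok)).1 (l.foldl pvStep (ws, bs, tok)).2.1
          (l.foldl pvStep (ws, bs, tok)).2.2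
        = pvFlushAll ws bs
            (((pvSplit l).map (List.map PySem.Chars.lowerChar)).modifyHead (tok ++ ·)) := by
  intro l
  induction l with
  | nil =>
    intro ws bs tok
    simp [pvSplit, List.modifyHead, pvFlushAll]
  | cons c t ih =>
    intro ws bs tok
    simp only [List.foldl_cons, pvStep]
    by_cases hd : c ∈ pvDelims
    · rw [if_pos (by simpa [pvDelims] using hd)]
      rw [ih]
      simp only [pvSplit, if_pos hd, List.map_cons, List.map_nil, List.modifyHead_cons,
        List.append_nil]
      rw [show (fun x => ([] : List Char) ++ x) = id from by funext x; simp,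
          List.modifyHead_id]
      rfl
    · rw [if_neg (by simpa [pvDelims] using hd)]
      rw [ih]
      simp only [pvSplit, if_neg hd, map_lower_modifyHead, List.modifyHead_modifyHead]
      congr 1
      apply congrFun
      apply congrArg
      funext x
      simp

-- A-side lemmas (split result, bigrams, dict build)
lemma join_two (a b : String) :
    PySem.Str.join " " [a, b] = String.ofList (a.toList ++ ' ' :: b.toList) := by
  simp [PySem.Str.join, PySem.Chars.join, List.intercalate, List.intersperse]

lemma grams_range (ws : List String) :
    (List.range (ws.length - 1)).map
        (fun k => PySem.Str.join " " ((ws.drop k).take 2))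
      = pvBigs ws := by
  induction ws with
  | nil => simp [pvBigs]
  | cons a t ih =>
    cases t with
    | nil => simp [pvBigs]
    | cons b t' =>
      simp only [pvBigs, List.length_cons, Nat.add_sub_cancel, List.range_succ_eq_map,
        List.map_cons, List.map_map, List.drop_zero, List.tail_cons, List.zip_cons_cons]
      refine List.cons_eq_cons.mpr ⟨by simpa using join_two a b, ?_⟩
      simp only [pvBigs, List.tail_cons] at ih
      rw [← ih]
      simp only [List.length_cons, Nat.add_sub_cancel]
      apply List.map_congr_left
      intro k _
      simp [Function.comp, Nat.succ_eq_add_one]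

lemma grams_eq (ws : List String) : get_n_grams ws 2 = pvBigs ws := by
  rw [get_n_grams, PySem.List.foldl_append_singleton_eq_map, PySem.List.pyRange_one,
    List.map_map, List.nil_append]
  rw [show ((ws.length : Int) - 2 + 1 - 0).toNat = ws.length - 1 by omega]
  rw [← grams_range ws]
  apply List.map_congr_left
  intro k _
  have : PySem.List.slice ws (some ((k : Nat) : Int)) (some (((k : Nat) : Int) + 2))
      = (ws.drop k).take 2 := by
    rw [show (((k : Nat) : Int) + 2) = ((k : Nat) : Int) + ((2 : Nat) : Int) by push_cast; ring]
    exact PySem.List.slice_natCast_add ws k 2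
  simp [Function.comp, this]

lemma lower_bigram (a b : String) :
    PySem.Str.lower (String.ofList (a.toList ++ ' ' :: b.toList))
      = String.ofList ((PySem.Str.lower a).toList ++ ' ' :: (PySem.Str.lower b).toList) := by
  simp [PySem.Str.lower, PySem.Chars.lower, show PySem.Chars.lowerChar ' ' = ' ' from rfl]

lemma dict_items (keys : List String) :
    ∀ (acc : List String),
      (keys.foldl (fun d s => d.insert s "") (PySem.Dict.mk (acc.map (fun k => (k, ""))))).items
        = (keys.foldl PySem.Set.add acc).map (fun k => (k, "")) := by
  induction keys with
  | nil => intro acc; simp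
  | cons k ks ih =>
    intro acc
    simp only [List.foldl_cons]
    have hc : (PySem.Dict.mk (acc.map (fun k => (k, ("" : String))))).contains k
        = PySem.Set.contains acc k := by
      simp only [PySem.Dict.contains, PySem.Set.contains, List.any_map,
        List.contains_eq_any_beq]
      congr 1
      funext a
      simp [Function.comp, eq_comm]
    by_cases h : PySem.Set.contains acc k = true
    · have hins : (PySem.Dict.mk (acc.map (fun k => (k, ("" : String))))).insert k ""
          = PySem.Dict.mk (acc.map (fun k => (k, ""))) := by
        rw [PySem.Dict.insert, hc, if_pos h]
        congr 1
        rw [List.map_map]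
        apply List.map_congr_left
        intro a _
        simp only [Function.comp]
        by_cases hak : (a == k) = true
        · simp [eq_of_beq hak]
        · simp [hak]
      rw [hins, ih acc, show PySem.Set.add acc k = acc from by rw [PySem.Set.add, if_pos h]]
    · have hins : (PySem.Dict.mk (acc.map (fun k => (k, ("" : String))))).insert k ""
          = PySem.Dict.mk ((acc ++ [k]).map (fun k => (k, ""))) := by
        rw [PySem.Dict.insert, hc, if_neg h]
        simp
      rw [hins, ih (acc ++ [k]), show PySem.Set.add acc k = acc ++ [k] from by
        rw [PySem.Set.add, if_neg h]]

lemma foldl_insert_lower (l : List String) (d : PySem.Dict String String) :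
    l.foldl (fun d s => d.insert (PySem.Str.lower s) "") d
      = (l.map PySem.Str.lower).foldl (fun d s => d.insert s "") d := by
  induction l generalizing d with
  | nil => rfl
  | cons x t ih => simp only [List.foldl_cons, List.map_cons, ih]

lemma merged_lower (base : List String) :
    (base ++ get_n_grams base 2).map PySem.Str.lower
      = base.map PySem.Str.lower ++ pvBigs (base.map PySem.Str.lower) := by
  rw [List.map_append, grams_eq]
  congr 1
  rw [pvBigs, pvBigs, List.map_map]
  rw [show (base.map PySem.Str.lower).tail = base.tail.map PySem.Str.lower from by
    cases base <;> simp]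
  rw [List.zip_map, List.map_map]
  apply List.map_congr_left
  intro p _
  simpa [Function.comp] using lower_bigram p.1 p.2

-- A's token list, lowered, is exactly the scanner's word list
lemma base_lower (l : List Char) :
    (((PySem.Str.split? (String.ofList (l.map pvClean)) " ").getD []).map PySem.Str.lower)
      = ((pvSplit l).map (List.map PySem.Chars.lowerChar)).map String.ofList := by
  rw [PySem.Str.split?]
  rw [show (String.ofList (l.map pvClean)).toList = l.map pvClean from by simp]
  rw [show (" ").toList = [' '] from rfl]
  rw [PySem.Chars.split?]
  simp only [List.isEmpty_cons, Bool.false_eq_true, if_false, Option.map_some, Option.getD_some]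
  rw [splitC_eq, splitC_clean, List.map_map, List.map_map]
  apply List.map_congr_left
  intro t _
  simp [Function.comp, PySem.Str.lower, PySem.Chars.lower]

-- ===== VERDICT (by name: the statement is the Claim_ definition above) =====
theorem parse_text_spec : Claim_equal_parse_text := by
  intro s _
  show parse_text s = parse_text_alt s
  simp only [parse_text, parse_text_alt]
  -- A's cleaned string
  have hclean : (([".", ",", "!", "?", ":", ";"] : List String).foldl
        (fun s punct => PySem.Str.replace s punct " ") s)
      = String.ofList (s.toList.map pvClean) := by
    conv_lhs => rw [← String.ofList_toList (s := (([".", ",", "!", "?", ":", ";"] : List String).foldl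
        (fun s punct => PySem.Str.replace s punct " ") s))]
    rw [clean_eq]
  rw [hclean]
  -- B's scanner result
  have hscan := scan_eq s.toList [] [] []
  simp only at hscan
  rw [show (((pvSplit s.toList).map (List.map PySem.Chars.lowerChar)).modifyHead
        (([] : List Char) ++ ·))
      = (pvSplit s.toList).map (List.map PySem.Chars.lowerChar) from by
    rw [show (fun x => ([] : List Char) ++ x) = id from by funext x; simp, List.modifyHead_id]
    simp]
      at hscan
  -- the scanner token list is nonempty
  obtain ⟨t, ts, hts⟩ :
      ∃ t ts, (pvSplit s.toList).map (List.map PySem.Chars.lowerChar) = t :: ts := by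
    cases h : (pvSplit s.toList).map (List.map PySem.Chars.lowerChar) with
    | nil =>
      exfalso
      have := pvSplit_ne_nil s.toList
      cases h' : pvSplit s.toList with
      | nil => exact this h'
      | cons a r => rw [h'] at h; simp at h
    | cons a r => exact ⟨a, r, rfl⟩
  rw [hts] at hscan
  rw [flushAll_full t ts] at hscan
  rw [hscan]
  -- both sides build the same dict from the same key list
  set base := ((PySem.Str.split? (String.ofList (s.toList.map pvClean)) " ").getD []) with hbase
  rw [foldl_insert_lower]
  have hdiA := dict_items ((base ++ get_n_grams base 2).map PySem.Str.lower) []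
  have hdiB := dict_items ((t :: ts).map String.ofList ++ pvBigs ((t :: ts).map String.ofList)) []
  simp only [List.map_nil] at hdiA hdiB
  rw [show (PySem.Dict.empty : PySem.Dict String String) = PySem.Dict.mk [] from rfl,
    hdiA, hdiB]
  rw [merged_lower base]
  have hbl : base.map PySem.Str.lower = (t :: ts).map String.ofList := by
    rw [hbase, base_lower, hts]
  rw [hbl]
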